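-- pv_equiv track=rewrite | github.com/li3zon3/automotive_codes | fortune.py | reduce_num
-- ===== SOURCE A (Python) =====
-- exception = [11, 22, 33]
--
-- def reduce_num(num):
--     if (num in exception) or (num < 10):
--         return num
--
--     s = 0
--     while num:
--         s += num % 10;
--         num = num // 10;
--
--     return reduce_num(s)
-- ===== SOURCE B (Python) =====
-- exception = [11, 22, 33]
--
--
-- def reduce_num(num):
--     # Iterative: repeatedly replace num by the sum of its decimal digits
--     # (taken from str(num)) until it is a single digit or a master number.
--     while num >= 10 and num not in exception:
--         num = sum(int(c) for c in str(num))
--     return num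
-- ===== Notes on version B (the rewrite author's own statement) =====
-- stated objective: idiomatic
-- what changed: The tail recursion plus hand-rolled %/// digit loop is replaced by a single while loop whose digit sum is computed idiomatically with sum(int(c) for c in str(num)).
import Mathlib
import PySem

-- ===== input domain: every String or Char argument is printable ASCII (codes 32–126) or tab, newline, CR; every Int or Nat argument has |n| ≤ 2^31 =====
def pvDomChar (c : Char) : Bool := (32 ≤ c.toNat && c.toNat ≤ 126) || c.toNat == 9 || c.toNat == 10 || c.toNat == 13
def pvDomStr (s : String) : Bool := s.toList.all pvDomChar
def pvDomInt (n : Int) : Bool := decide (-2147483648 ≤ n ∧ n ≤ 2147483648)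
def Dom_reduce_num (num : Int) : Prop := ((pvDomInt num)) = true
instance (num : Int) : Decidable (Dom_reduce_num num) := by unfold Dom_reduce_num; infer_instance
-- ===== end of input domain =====

-- B replaces A's tail recursion + hand-rolled %,// digit loop by one while loop whose digit
-- sum is read off str(num); objective: idiomatic (not claimed faster).

-- ===== PORT A =====
-- module constant `exception = [11, 22, 33]`
def pyExceptionA : List Int := [11, 22, 33]

-- `s = 0; while num: s += num % 10; num = num // 10` — fuel only makes the loop total in
-- Lean; A only enters it with num ≥ 10, where `fuel = num.toNat` iterations always suffice
-- (shown in pyDigitLoopA_eq below), so the fuel-out branch is never taken for A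
def pyDigitLoopA : Nat → Int → Int → Int
  | 0, _, s => s
  | fuel + 1, num, s =>
    if num ≠ 0 then pyDigitLoopA fuel (PySem.Int.floordiv num 10) (s + PySem.Int.mod num 10)
    else s

-- `if (num in exception) or (num < 10): return num` else recurse on the digit sum; the
-- digit sum of num ≥ 10 is strictly smaller than num (digitSum_lt below), so A's recursion
-- depth is under num.toNat + 1: the fuel is a totality guard only, its 0-branch unreachable
def pyReduceA : Nat → Int → Int
  | 0, num => num
  | fuel + 1, num =>
    if num ∈ pyExceptionA ∨ num < 10 then num
    else pyReduceA fuel (pyDigitLoopA num.toNat num 0)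

def reduce_num (num : Int) : Int := pyReduceA (num.toNat + 1) num

-- ===== PORT B =====
def pyExceptionB : List Int := [11, 22, 33]

-- `sum(int(c) for c in str(num))`; B only calls this with num ≥ 10, where every character
-- of str(num) is a decimal digit, so int(c) always succeeds (the getD 0 is never taken)
def strDigitSum (num : Int) : Int :=
  ((PySem.Int.toChars num).map (fun c => (PySem.Int.ofChars? [c]).getD 0)).sum

-- `while num >= 10 and num not in exception: num = sum(int(c) for c in str(num))`; the value
-- shrinks every iteration (digitSum_lt below) so num.toNat + 1 fuel is never exhausted
def pyLoopB : Nat → Int → Int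
  | 0, num => num
  | fuel + 1, num =>
    if 10 ≤ num ∧ num ∉ pyExceptionB then pyLoopB fuel (strDigitSum num)
    else num

def reduce_num_alt (num : Int) : Int := pyLoopB (num.toNat + 1) num

-- ===== PRECONDITION & SPEC =====
def Spec_reduce_num (num : Int) (out : Int) : Prop := out = reduce_num_alt num
instance (num : Int) (out : Int) : Decidable (Spec_reduce_num num out) := by unfold Spec_reduce_num; infer_instance

-- ===== CLAIM (what is proved, stated in full; the proofs are below) =====
def Claim_equal_reduce_num : Prop := ∀ (num : Int), Dom_reduce_num num → Spec_reduce_num num (reduce_num num)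

-- ===== LEMMAS AND PROOFS =====

-- A's digit loop computes the decimal digit sum whenever it has ≥ n iterations of fuel
theorem pyDigitLoopA_eq (fuel : Nat) :
    ∀ (n : Nat) (s : Int), n ≤ fuel →
      pyDigitLoopA fuel (n : Int) s = s + ((Nat.digits 10 n).sum : Int) := by
  induction fuel with
  | zero =>
    intro n s h
    have hn : n = 0 := by omega
    subst hn
    simp [pyDigitLoopA]
  | succ fuel ih =>
    intro n s h
    rcases Nat.eq_zero_or_pos n with h0 | h0
    · subst h0
      simp [pyDigitLoopA]
    · have hne : ((n : Int) ≠ 0) := by exact_mod_cast Nat.pos_iff_ne_zero.mp h0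
      have e1 : PySem.Int.floordiv ((n : Nat) : Int) 10 = ((n / 10 : Nat) : Int) := by
        exact_mod_cast PySem.Int.floordiv_natCast n 10
      have e2 : PySem.Int.mod ((n : Nat) : Int) 10 = ((n % 10 : Nat) : Int) := by
        exact_mod_cast PySem.Int.mod_natCast n 10
      have hlt := Nat.div_lt_self h0 (by omega : 1 < 10)
      rw [pyDigitLoopA, if_pos hne, e1, e2, ih (n / 10) _ (by omega),
        Nat.digits_def' (by omega : 1 < 10) h0, List.sum_cons]
      push_cast
      ring

-- the decimal digit sum of n ≥ 10 is strictly smaller than n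
theorem digitSum_lt (n : Nat) (h : 10 ≤ n) : (Nat.digits 10 n).sum < n := by
  rw [Nat.digits_def' (by omega : 1 < 10) (by omega : 0 < n)]
  have h1 := Nat.digit_sum_le 10 (n / 10)
  have h2 := Nat.div_add_mod n 10
  have h4 : 1 ≤ n / 10 := (Nat.one_le_div_iff (by omega)).mpr h
  simp only [List.sum_cons]
  omega

-- int(c) of a single digit character produced by the decimal printer
theorem parse_digitChar (d : Nat) (h : d < 10) :
    (PySem.Int.ofChars? [Nat.digitChar d]).getD 0 = (d : Int) := by
  interval_cases d <;> decide

-- digit-character sum of Nat.toDigitsCore = decimal digit sum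
theorem toDigitsCore_parse_sum (fuel : Nat) :
    ∀ (n : Nat) (acc : List Char), n < fuel →
      ((Nat.toDigitsCore 10 fuel n acc).map (fun c => (PySem.Int.ofChars? [c]).getD 0)).sum
        = ((Nat.digits 10 n).sum : Int)
          + ((acc.map (fun c => (PySem.Int.ofChars? [c]).getD 0)).sum) := by
  induction fuel with
  | zero => intro n acc h; omega
  | succ fuel ih =>
    intro n acc h
    rw [Nat.toDigitsCore]
    by_cases h0 : n / 10 = 0
    · have hn : n < 10 := by omega
      rw [if_pos h0]
      rcases Nat.eq_zero_or_pos n with h1 | h1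
      · subst h1; simp [parse_digitChar 0 (by omega)]
      · rw [Nat.digits_def' (by omega : 1 < 10) h1, h0]
        simp [parse_digitChar (n % 10) (Nat.mod_lt n (by omega))]
    · rw [if_neg h0]
      have hn10 : 10 ≤ n := by
        by_contra hc
        exact h0 (Nat.div_eq_of_lt (by omega))
      have hlt : n / 10 < fuel := by
        have := Nat.div_lt_self (by omega : 0 < n) (by omega : 1 < 10)
        omega
      rw [ih (n / 10) _ hlt, Nat.digits_def' (by omega : 1 < 10) (by omega : 0 < n)]
      simp [parse_digitChar (n % 10) (Nat.mod_lt n (by omega))]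
      ring

-- B's str-based digit sum is the same decimal digit sum
theorem strDigitSum_eq (n : Nat) :
    strDigitSum (n : Int) = ((Nat.digits 10 n).sum : Int) := by
  unfold strDigitSum
  rw [show PySem.Int.toChars (n : Int) = Nat.toDigits 10 n by
    simp [PySem.Int.toChars]]
  rw [Nat.toDigits, toDigitsCore_parse_sum (n + 1) n [] (by omega)]
  simp

-- per pass the two ports feed the same digit sum back in
theorem step_eq (num : Int) (h : 10 ≤ num) :
    pyDigitLoopA num.toNat num 0 = strDigitSum num := by
  have hn : num = ((num.toNat : Nat) : Int) := by omega
  rw [hn, Int.toNat_natCast,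
    pyDigitLoopA_eq num.toNat num.toNat 0 le_rfl, strDigitSum_eq num.toNat]
  simp

theorem loops_eq (fuel : Nat) :
    ∀ (num : Int), num.toNat < fuel → pyReduceA fuel num = pyLoopB fuel num := by
  induction fuel with
  | zero => intro num h; omega
  | succ fuel ih =>
    intro num h
    rw [pyReduceA, pyLoopB]
    by_cases hc : num ∈ pyExceptionA ∨ num < 10
    · rw [if_pos hc, if_neg (by
        simp only [pyExceptionA, pyExceptionB, List.mem_cons, List.not_mem_nil, or_false] at *
        omega)]
    · have h10 : 10 ≤ num := by
        simp only [pyExceptionA, List.mem_cons, List.not_mem_nil, or_false] at hc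
        omega
      rw [if_neg hc, if_pos (by
        refine ⟨h10, ?_⟩
        simp only [pyExceptionA, pyExceptionB, List.mem_cons, List.not_mem_nil, or_false] at *
        omega)]
      rw [step_eq num h10]
      refine ih (strDigitSum num) ?_
      have hn : num = ((num.toNat : Nat) : Int) := by omega
      have hlt := digitSum_lt num.toNat (by omega)
      have he : strDigitSum num = ((Nat.digits 10 num.toNat).sum : Int) := by
        rw [hn]; exact strDigitSum_eq num.toNat
      omega

-- ===== VERDICT (by name: the statement is the Claim_ definition above) =====
theorem reduce_num_spec : Claim_equal_reduce_num := by
  intro num _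
  unfold Spec_reduce_num reduce_num reduce_num_alt
  exact loops_eq (num.toNat + 1) num (by omega)
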